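-- pv_equiv track=rewrite | github.com/kadirikumar-uptycs/Flames | App/views.py | differentLettersCount
-- ===== SOURCE A (Python) =====
-- from collections import defaultdict
--
-- def differentLettersCount(name1, name2):
--     d1 = defaultdict(int)
--     d2 = defaultdict(int)
--
--     for letter in name1:
--         d1[letter] += 1
--
--     for letter in name2:
--         d2[letter] += 1
--
--     ans = 0
--     for ascii in range(ord('a'), ord('z')+1):
--         ans += abs(d1[chr(ascii)] - d2[chr(ascii)])
--     return ans
-- ===== SOURCE B (Python) =====
-- def differentLettersCount(name1, name2):
--     s1 = sorted(c for c in name1 if 'a' <= c <= 'z')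
--     s2 = sorted(c for c in name2 if 'a' <= c <= 'z')
--     i = j = ans = 0
--     while i < len(s1) and j < len(s2):
--         if s1[i] == s2[j]:
--             i += 1
--             j += 1
--         elif s1[i] < s2[j]:
--             i += 1
--             ans += 1
--         else:
--             j += 1
--             ans += 1
--     return ans + (len(s1) - i) + (len(s2) - j)
-- ===== Notes on version B (the rewrite author's own statement) =====
-- stated objective: alternative
-- what changed: Replaces A's two hash-map counters plus a fixed ord('a')..ord('z') scan by sort-then-merge: filter each string to its lowercase letters, sort both, and count unmatched elements with a two-pointer merge (the answer is the size of the multiset symmetric difference).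
import Mathlib
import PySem

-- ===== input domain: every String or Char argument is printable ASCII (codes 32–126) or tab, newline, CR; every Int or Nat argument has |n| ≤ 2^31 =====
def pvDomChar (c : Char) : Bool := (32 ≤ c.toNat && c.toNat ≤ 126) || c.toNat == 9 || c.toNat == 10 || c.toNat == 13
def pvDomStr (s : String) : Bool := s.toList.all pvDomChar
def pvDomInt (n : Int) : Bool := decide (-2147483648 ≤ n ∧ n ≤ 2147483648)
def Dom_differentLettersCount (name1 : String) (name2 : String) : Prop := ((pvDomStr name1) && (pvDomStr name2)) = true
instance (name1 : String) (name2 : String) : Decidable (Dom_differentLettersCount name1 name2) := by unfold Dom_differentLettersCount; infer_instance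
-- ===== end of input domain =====

-- B replaces A's two hash-map counters plus a fixed ord('a')..ord('z') scan by sort-then-merge:
-- filter each string to its lowercase letters, sort both, and count unmatched elements with a
-- two-pointer merge (objective: alternative algorithm, same result).

-- ===== PORT A =====
def differentLettersCount (name1 : String) (name2 : String) : Int :=
  let d1 := name1.toList.foldl (fun d letter => d.modify letter 0 (· + 1)) PySem.Dict.empty
  let d2 := name2.toList.foldl (fun d letter => d.modify letter 0 (· + 1)) PySem.Dict.empty
  (PySem.List.pyRange 97 123 1).foldl
    (fun ans i => ans + |d1.getD (Char.ofNat i.toNat) 0 - d2.getD (Char.ofNat i.toNat) 0|) 0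

-- ===== PORT B =====
-- Source B's while loop over two indices, as the obvious structural recursion on the two lists
def mergeDiff : List Char → List Char → Int
  | [], s2 => s2.length
  | x :: xs, [] => (x :: xs).length
  | x :: xs, y :: ys =>
    if x = y then mergeDiff xs ys
    else if x < y then 1 + mergeDiff xs (y :: ys)
    else 1 + mergeDiff (x :: xs) ys
termination_by s1 s2 => s1.length + s2.length
decreasing_by all_goals simp <;> omega

def differentLettersCount_alt (name1 : String) (name2 : String) : Int :=
  let s1 := PySem.List.sorted (name1.toList.filter (fun c => 'a' ≤ c && c ≤ 'z')) (fun c => c)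
  let s2 := PySem.List.sorted (name2.toList.filter (fun c => 'a' ≤ c && c ≤ 'z')) (fun c => c)
  mergeDiff s1 s2

-- ===== PRECONDITION & SPEC =====
def Spec_differentLettersCount (name1 : String) (name2 : String) (out : Int) : Prop := out = differentLettersCount_alt name1 name2
instance (name1 : String) (name2 : String) (out : Int) : Decidable (Spec_differentLettersCount name1 name2 out) := by unfold Spec_differentLettersCount; infer_instance

-- ===== CLAIM (what is proved, stated in full; the proofs are below) =====
def Claim_equal_differentLettersCount : Prop := ∀ (name1 : String) (name2 : String), Dom_differentLettersCount name1 name2 → Spec_differentLettersCount name1 name2 (differentLettersCount name1 name2)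

-- ===== LEMMAS AND PROOFS =====

-- A as a pure sum of per-letter count differences
theorem differentLettersCount_eq_sum (name1 name2 : String) :
    differentLettersCount name1 name2 =
      ((PySem.List.pyRange 97 123 1).map
        (fun i => |((name1.toList.count (Char.ofNat i.toNat) : Int))
          - (name2.toList.count (Char.ofNat i.toNat) : Int)|)).sum := by
  simp only [differentLettersCount]
  rw [PySem.List.foldl_add]
  simp only [PySem.Dict.getD_foldl_modify_add_one, PySem.Dict.getD_empty, zero_add]

-- a nodup list's mapped sum as a Finset sum
theorem sum_map_nodup {α : Type} [DecidableEq α] (l : List α) (f : α → Int) (h : l.Nodup) :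
    (l.map f).sum = ∑ c ∈ l.toFinset, f c := by
  rw [Finset.sum_list_map_count]
  exact Finset.sum_congr rfl fun x hx => by
    rw [List.count_eq_one_of_mem h (List.mem_toFinset.mp hx), one_nsmul]

theorem char_le_of_toNat_le {a b : Char} (h : a.toNat ≤ b.toNat) : a ≤ b :=
  Char.le_def.mpr (UInt32.le_iff_toNat_le.mpr h)

theorem toNat_ofNat_of_lt {n : Nat} (h : n < 55296) : (Char.ofNat n).toNat = n := by
  rw [Char.toNat_ofNat, if_pos (Or.inl h)]

-- a lowercase char is hit by A's ord('a')..ord('z') scan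
theorem mem_scan_of_lower (c : Char) (h1 : 'a' ≤ c) (h2 : c ≤ 'z') :
    c ∈ (PySem.List.pyRange 97 123 1).map (fun i => Char.ofNat i.toNat) := by
  have hv1 : 97 ≤ c.toNat := h1
  have hv2 : c.toNat ≤ 122 := h2
  refine List.mem_map.mpr ⟨(c.toNat : Int), ?_, ?_⟩
  · rw [PySem.List.mem_pyRange_one]; omega
  · simp [Char.ofNat_toNat]

theorem scan_nodup : ((PySem.List.pyRange 97 123 1).map (fun i => Char.ofNat i.toNat)).Nodup := by
  refine List.Nodup.map_on ?_ (PySem.List.nodup_pyRange_one 97 123)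
  intro i hi j hj he
  rw [PySem.List.mem_pyRange_one] at hi hj
  have h1 : (Char.ofNat i.toNat).toNat = i.toNat := toNat_ofNat_of_lt (by omega)
  have h2 : (Char.ofNat j.toNat).toNat = j.toNat := toNat_ofNat_of_lt (by omega)
  have h3 := congrArg Char.toNat he
  rw [h1, h2] at h3
  omega

-- multiset difference under a cons absent on the other side
theorem cons_sub_of_not_mem {x : Char} {s t : Multiset Char} (h : x ∉ t) :
    (x ::ₘ s) - t = x ::ₘ (s - t) := by
  ext a
  simp only [Multiset.count_sub, Multiset.count_cons]
  by_cases ha : a = x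
  · subst ha
    rw [Multiset.count_eq_zero.mpr h]
    omega
  · simp [ha]

theorem sub_cons_of_not_mem {x : Char} {s t : Multiset Char} (h : x ∉ t) :
    t - (x ::ₘ s) = t - s := by
  ext a
  simp only [Multiset.count_sub, Multiset.count_cons]
  by_cases ha : a = x
  · subst ha
    rw [Multiset.count_eq_zero.mpr h]
    omega
  · simp [ha]

theorem mergeDiff_card (l1 l2 : List Char) (h1 : l1.Pairwise (· ≤ ·)) (h2 : l2.Pairwise (· ≤ ·)) :
    mergeDiff l1 l2 = ((((l1 : Multiset Char) - l2) + ((l2 : Multiset Char) - l1)).card : Int) := by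
  fun_induction mergeDiff l1 l2 with
  | case1 s2 => simp
  | case2 x xs => simp
  | case3 xs y ys ih =>
    rw [ih (List.Pairwise.sublist (List.sublist_cons_self y xs) h1)
        (List.Pairwise.sublist (List.sublist_cons_self y ys) h2)]
    simp only [← Multiset.cons_coe, Multiset.sub_cons, Multiset.erase_cons_head]
  | case4 x xs y ys hne hlt ih =>
    have hx : x ∉ (y :: ys) := by
      intro hm
      rcases List.mem_cons.mp hm with h | h
      · exact hne h
      · exact absurd hlt (not_lt.mpr ((List.pairwise_cons.mp h2).1 x h))
    have hx' : x ∉ (y ::ₘ ((ys : List Char) : Multiset Char)) := by simpa using hx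
    rw [ih (List.Pairwise.sublist (List.sublist_cons_self x xs) h1) h2]
    simp only [← Multiset.cons_coe]
    rw [cons_sub_of_not_mem hx', sub_cons_of_not_mem hx']
    push_cast [Multiset.card_add, Multiset.card_cons]
    ring
  | case5 x xs y ys hne hnlt ih =>
    have hy : y ∉ (x :: xs) := by
      intro hm
      rcases List.mem_cons.mp hm with h | h
      · exact hne h.symm
      · rcases lt_or_eq_of_le ((List.pairwise_cons.mp h1).1 y h) with h' | h'
        · exact hnlt h'
        · exact hne h'
    have hy' : y ∉ (x ::ₘ ((xs : List Char) : Multiset Char)) := by simpa using hy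
    rw [ih h1 (List.Pairwise.sublist (List.sublist_cons_self y ys) h2)]
    simp only [← Multiset.cons_coe]
    rw [cons_sub_of_not_mem hy', sub_cons_of_not_mem hy']
    push_cast [Multiset.card_add, Multiset.card_cons]
    ring

-- card of a multiset as a sum of counts over any superset of its support
theorem card_eq_sum_count_superset (m : Multiset Char) (A : Finset Char)
    (h : m.toFinset ⊆ A) : m.card = ∑ c ∈ A, m.count c := by
  rw [← Multiset.toFinset_sum_count_eq]
  exact Finset.sum_subset h fun x _ hx =>
    Multiset.count_eq_zero.mpr fun hm => hx (Multiset.mem_toFinset.mpr hm)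

theorem abs_sub_eq_trunc (a b : Nat) : |((a : Int)) - b| = (((a - b) + (b - a) : Nat) : Int) := by
  rcases le_total a b with h | h
  · rw [abs_of_nonpos (by omega : ((a : Int)) - b ≤ 0)]
    push_cast [Nat.sub_eq_zero_of_le h]
    omega
  · rw [abs_of_nonneg (by omega : (0 : Int) ≤ ((a : Int)) - b)]
    push_cast [Nat.sub_eq_zero_of_le h]
    omega

-- ===== VERDICT (by name: the statement is the Claim_ definition above) =====
theorem differentLettersCount_spec : Claim_equal_differentLettersCount := by
  intro name1 name2 _
  unfold Spec_differentLettersCount differentLettersCount_alt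
  rw [differentLettersCount_eq_sum]
  set l1 := name1.toList with hl1
  set l2 := name2.toList with hl2
  set f1 := l1.filter (fun c => 'a' ≤ c && c ≤ 'z') with hf1
  set f2 := l2.filter (fun c => 'a' ≤ c && c ≤ 'z') with hf2
  have hpw1 : (PySem.List.sorted f1 (fun c => c)).Pairwise (· ≤ ·) :=
    PySem.List.sorted_pairwise f1 (fun c => c)
  have hpw2 : (PySem.List.sorted f2 (fun c => c)).Pairwise (· ≤ ·) :=
    PySem.List.sorted_pairwise f2 (fun c => c)
  rw [mergeDiff_card _ _ hpw1 hpw2]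
  have hm1 : ((PySem.List.sorted f1 (fun c => c) : List Char) : Multiset Char) = (f1 : Multiset Char) :=
    Quot.sound (PySem.List.sorted_perm f1 (fun c => c) false)
  have hm2 : ((PySem.List.sorted f2 (fun c => c) : List Char) : Multiset Char) = (f2 : Multiset Char) :=
    Quot.sound (PySem.List.sorted_perm f2 (fun c => c) false)
  rw [hm1, hm2]
  set L := (PySem.List.pyRange 97 123 1).map (fun i => Char.ofNat i.toNat) with hL
  have hsub : ∀ (f : List Char), (∀ c ∈ f, ('a' ≤ c ∧ c ≤ 'z')) →
      (f : Multiset Char).toFinset ⊆ L.toFinset := by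
    intro f hf x hx
    rw [Multiset.mem_toFinset, Multiset.mem_coe] at hx
    obtain ⟨ha, hb⟩ := hf x hx
    exact List.mem_toFinset.mpr (mem_scan_of_lower x ha hb)
  have hlow1 : ∀ c ∈ f1, ('a' ≤ c ∧ c ≤ 'z') := by
    intro c hc
    have := (List.mem_filter.mp hc).2
    simpa using this
  have hlow2 : ∀ c ∈ f2, ('a' ≤ c ∧ c ≤ 'z') := by
    intro c hc
    have := (List.mem_filter.mp hc).2
    simpa using this
  have hsubA : ((f1 : Multiset Char) - f2).toFinset ⊆ L.toFinset := by
    intro x hx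
    refine hsub f1 hlow1 ?_
    rw [Multiset.mem_toFinset] at hx ⊢
    exact Multiset.mem_of_le (Multiset.sub_le_self _ _) hx
  have hsubB : ((f2 : Multiset Char) - f1).toFinset ⊆ L.toFinset := by
    intro x hx
    refine hsub f2 hlow2 ?_
    rw [Multiset.mem_toFinset] at hx ⊢
    exact Multiset.mem_of_le (Multiset.sub_le_self _ _) hx
  rw [Multiset.card_add,
    card_eq_sum_count_superset _ _ hsubA, card_eq_sum_count_superset _ _ hsubB]
  have hmapeq : (PySem.List.pyRange 97 123 1).map
        (fun i => |((l1.count (Char.ofNat i.toNat) : Int)) - (l2.count (Char.ofNat i.toNat) : Int)|)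
      = L.map (fun c => |((l1.count c : Int)) - (l2.count c : Int)|) := by
    rw [hL, List.map_map]
    rfl
  rw [hmapeq, sum_map_nodup _ _ scan_nodup]
  push_cast [← Finset.sum_add_distrib]
  refine Finset.sum_congr rfl fun c hc => ?_
  have hcl : 'a' ≤ c ∧ c ≤ 'z' := by
    rw [List.mem_toFinset, hL] at hc
    obtain ⟨i, hi, rfl⟩ := List.mem_map.mp hc
    rw [PySem.List.mem_pyRange_one] at hi
    have ht : (Char.ofNat i.toNat).toNat = i.toNat := toNat_ofNat_of_lt (by omega)
    refine ⟨char_le_of_toNat_le ?_, char_le_of_toNat_le ?_⟩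
    · have ha : ('a').toNat = 97 := rfl
      rw [ha, ht]; omega
    · have hz : ('z').toNat = 122 := rfl
      rw [hz, ht]; omega
  have hc1 : f1.count c = l1.count c := by
    rw [hf1]
    rw [List.count_filter]
    simp [hcl.1, hcl.2]
  have hc2 : f2.count c = l2.count c := by
    rw [hf2]
    rw [List.count_filter]
    simp [hcl.1, hcl.2]
  rw [Multiset.count_sub, Multiset.count_sub]
  simp only [Multiset.coe_count, hc1, hc2]
  have h := abs_sub_eq_trunc (l1.count c) (l2.count c)
  push_cast at h
  exact h
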